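-- pv_equiv track=rewrite | github.com/constantbourdrez/data_acq | merge.py | merge_datasets
-- ===== SOURCE A (Python) =====
-- def merge_datasets(data1, data2, keys):
--     # Create a dictionary for quick lookup by key combination
--     merged = {}
--     for entry in data2:
--         key = tuple(entry[k] for k in keys)  # Create key as tuple
--         merged[key] = entry
--
--     # Merge data1 with matching data2 entries
--     result = []
--     for entry in data1:
--         key = tuple(entry[k] for k in keys)
--         if key in merged:
--             merged_entry = merged[key]
--             merged_data = {**entry, **merged_entry}  # Merge the two dictionaries
--             result.append(merged_data)
--
--     return result
-- ===== SOURCE B (Python) =====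
-- def merge_datasets(data1, data2, keys):
--     # Nested-scan inner join: for each data1 row, scan data2 keeping the LAST
--     # entry whose key tuple matches (same result as A's last-wins lookup dict).
--     result = []
--     for entry in data1:
--         key = tuple(entry[k] for k in keys)
--         match = None
--         for e2 in data2:
--             if tuple(e2[k] for k in keys) == key:
--                 match = e2
--         if match is not None:
--             result.append({**entry, **match})
--     return result
-- ===== Notes on version B (the rewrite author's own statement) =====
-- stated objective: alternative
-- what changed: drops A's prebuilt key->row lookup dict and instead, for each data1 row, scans data2 in a nested loop keeping the last matching row
import Mathlib
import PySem

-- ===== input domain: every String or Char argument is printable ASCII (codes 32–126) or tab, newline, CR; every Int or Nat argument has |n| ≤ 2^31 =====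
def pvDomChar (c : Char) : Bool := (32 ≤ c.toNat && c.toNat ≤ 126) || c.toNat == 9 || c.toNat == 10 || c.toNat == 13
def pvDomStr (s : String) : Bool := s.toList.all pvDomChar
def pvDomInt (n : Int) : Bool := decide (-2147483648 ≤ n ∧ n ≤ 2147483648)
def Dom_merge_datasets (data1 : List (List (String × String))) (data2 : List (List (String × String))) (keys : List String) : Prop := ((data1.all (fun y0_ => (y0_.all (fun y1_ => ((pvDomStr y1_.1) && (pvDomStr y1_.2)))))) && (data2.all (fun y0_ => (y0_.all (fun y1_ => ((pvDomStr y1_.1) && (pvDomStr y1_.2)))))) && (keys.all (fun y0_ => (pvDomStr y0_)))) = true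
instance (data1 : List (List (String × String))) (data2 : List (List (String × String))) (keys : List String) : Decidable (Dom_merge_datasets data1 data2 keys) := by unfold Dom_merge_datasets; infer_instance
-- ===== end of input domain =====

-- B replaces A's prebuilt key->row lookup dict with a per-row nested scan of data2 keeping the
-- last match (objective: alternative decomposition, same result; not faster).
-- Rows arrive as association lists standing for Python dicts: both ports read them through the
-- same dict semantics (last value wins, first position kept), as Python's dict() does.

-- shared row/dict boundary helpers (the Python dict semantics of a row; used identically by both sides)
def pvRowDict (e : List (String × String)) : PySem.Dict String String :=
  e.foldl (fun d p => d.insert p.1 p.2) PySem.Dict.empty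

-- key = tuple(entry[k] for k in keys)  (within Pre_ every k is present, so getD never defaults)
def pvKeyOf (keys : List String) (e : List (String × String)) : List String :=
  keys.map (fun k => (pvRowDict e).getD k "")

-- {**entry, **match_entry} rendered back as an items list
def pvMergeRow (e me : List (String × String)) : List (String × String) :=
  (me.foldl (fun d p => d.insert p.1 p.2) (pvRowDict e)).items

-- ===== PORT A =====
def merge_datasets (data1 : List (List (String × String))) (data2 : List (List (String × String))) (keys : List String) : List (List (String × String)) :=
  -- merged = {key tuple ↦ entry} built over data2 (last wins)
  let merged : PySem.Dict (List String) (List (String × String)) :=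
    data2.foldl (fun m entry => m.insert (pvKeyOf keys entry) entry) PySem.Dict.empty
  -- result loop over data1
  data1.foldl (fun result entry =>
    match merged.get? (pvKeyOf keys entry) with
    | some me => result ++ [pvMergeRow entry me]
    | none => result) []

-- ===== PORT B =====
-- inner nested scan: last data2 row whose key tuple equals k
def pvLastMatch (data2 : List (List (String × String))) (keys : List String) (k : List String) : Option (List (String × String)) :=
  data2.foldl (fun acc e2 => if pvKeyOf keys e2 == k then some e2 else acc) none

def merge_datasets_alt (data1 : List (List (String × String))) (data2 : List (List (String × String))) (keys : List String) : List (List (String × String)) :=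
  data1.filterMap (fun entry =>
    (pvLastMatch data2 keys (pvKeyOf keys entry)).map (pvMergeRow entry))

-- ===== PRECONDITION & SPEC =====
-- Pre_ excludes exactly the inputs where Python A raises KeyError: some row of data1 or data2
-- lacking one of the key fields.
def Pre_merge_datasets (data1 : List (List (String × String))) (data2 : List (List (String × String))) (keys : List String) : Prop :=
  (data1.all (fun e => keys.all (fun k => e.any (fun p => p.1 == k)))
    && data2.all (fun e => keys.all (fun k => e.any (fun p => p.1 == k)))) = true
instance (data1 : List (List (String × String))) (data2 : List (List (String × String))) (keys : List String) : Decidable (Pre_merge_datasets data1 data2 keys) := by unfold Pre_merge_datasets; infer_instance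

def pvWitness_merge_datasets : (List (List (String × String))) × (List (List (String × String))) × List String :=
  ([[("a", "1"), ("c", "z")]], [[("a", "1"), ("b", "2")]], ["a"])

def Spec_merge_datasets (data1 : List (List (String × String))) (data2 : List (List (String × String))) (keys : List String) (out : List (List (String × String))) : Prop := out = merge_datasets_alt data1 data2 keys
instance (data1 : List (List (String × String))) (data2 : List (List (String × String))) (keys : List String) (out : List (List (String × String))) : Decidable (Spec_merge_datasets data1 data2 keys out) := by unfold Spec_merge_datasets; infer_instance

-- ===== CLAIM (what is proved, stated in full; the proofs are below) =====
def Claim_equal_merge_datasets : Prop := ∀ (data1 : List (List (String × String))) (data2 : List (List (String × String))) (keys : List String), Dom_merge_datasets data1 data2 keys → Pre_merge_datasets data1 data2 keys → Spec_merge_datasets data1 data2 keys (merge_datasets data1 data2 keys)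

-- ===== LEMMAS AND PROOFS =====

-- A's dict built by a last-wins insert loop answers get? exactly as B's "keep the last match" scan.
theorem get?_foldl_insert_key_eq_lastScan (l : List (List (String × String))) (keys : List String)
    (k : List String) (m : PySem.Dict (List String) (List (String × String))) :
    (l.foldl (fun m e => m.insert (pvKeyOf keys e) e) m).get? k
      = l.foldl (fun acc e => if pvKeyOf keys e == k then some e else acc) (m.get? k) := by
  induction l generalizing m with
  | nil => rfl
  | cons e t ih =>
      simp only [List.foldl_cons, ih, PySem.Dict.get?_insert]
      by_cases h : pvKeyOf keys e = k
      · simp [h]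
      · simp [h, Ne.symm h]

-- A's append-accumulator loop is a filterMap of its per-row option.
theorem foldl_append_opt {α β : Type} (f : α → Option β) (l : List α) (acc : List β)
    (F : List β → α → List β)
    (hF : ∀ res e, F res e = match f e with | some v => res ++ [v] | none => res) :
    l.foldl F acc = acc ++ l.filterMap f := by
  induction l generalizing acc with
  | nil => simp
  | cons e t ih =>
      rw [List.foldl_cons, hF]
      cases hg : f e <;> simp [hg, ih]

theorem merge_eq (data1 data2 : List (List (String × String))) (keys : List String) :
    merge_datasets data1 data2 keys = merge_datasets_alt data1 data2 keys := by
  have hget : ∀ e, (data2.foldl (fun m entry => m.insert (pvKeyOf keys entry) entry)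
        PySem.Dict.empty).get? (pvKeyOf keys e) = pvLastMatch data2 keys (pvKeyOf keys e) := by
    intro e
    rw [get?_foldl_insert_key_eq_lastScan]
    rfl
  simp only [merge_datasets, merge_datasets_alt]
  refine (foldl_append_opt
      (fun entry => (pvLastMatch data2 keys (pvKeyOf keys entry)).map (pvMergeRow entry))
      data1 [] _ ?_).trans (List.nil_append _)
  intro res e
  simp only [hget e]
  cases pvLastMatch data2 keys (pvKeyOf keys e) <;> rfl

-- ===== VERDICT (by name: the statement is the Claim_ definition above) =====
theorem merge_datasets_spec : Claim_equal_merge_datasets := by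
  intro data1 data2 keys _ _
  exact merge_eq data1 data2 keys
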